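-- pv_equiv track=rewrite | github.com/angelonuoha/Artist-Booking-Site | app.py | create_genre_arr
-- ===== SOURCE A (Python) =====
-- def create_genre_arr(string):
--   genres = []
--   genre = ""
--   for ltr in string:
--     if ltr == "{" or ltr == "\"":
--       continue
--     elif ltr == "," or ltr == "}":
--         genres.append(genre)
--         genre = ""
--         continue
--     genre += ltr
--   return genres
-- ===== SOURCE B (Python) =====
-- def create_genre_arr(string):
--     cleaned = string.replace('{', '').replace('"', '').replace('}', ',')
--     return cleaned.split(',')[:-1]
-- ===== Notes on version B (the rewrite author's own statement) =====
-- stated objective: idiomatic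
-- what changed: Replaces A's character-by-character state machine (accumulating a current genre and flushing it on ',' or '}') with a clean/split pipeline: strip the brace and quote characters, turn the closing brace into the comma delimiter, split on the delimiter and drop the final piece.
import Mathlib
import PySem

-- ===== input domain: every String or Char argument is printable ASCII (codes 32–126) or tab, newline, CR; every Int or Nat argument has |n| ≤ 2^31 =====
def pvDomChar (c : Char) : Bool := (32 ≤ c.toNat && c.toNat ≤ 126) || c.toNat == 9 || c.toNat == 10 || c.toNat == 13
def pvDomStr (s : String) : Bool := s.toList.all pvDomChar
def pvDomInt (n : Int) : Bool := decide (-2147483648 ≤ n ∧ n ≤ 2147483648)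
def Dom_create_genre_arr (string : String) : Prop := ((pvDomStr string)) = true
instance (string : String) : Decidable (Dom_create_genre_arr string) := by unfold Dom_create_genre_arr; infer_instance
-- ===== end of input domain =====

-- B: same values as A, computed by a clean/split pipeline (str.replace + split + drop last piece) instead of a character state machine; same O(n), measurably faster via C-level string methods.

-- ===== PORT A =====
-- A's character loop: state is (genres, genre); the genre string is carried as List Char.
def aStep (st : List (List Char) × List Char) (ltr : Char) : List (List Char) × List Char :=
  if ltr = '{' ∨ ltr = '"' then st
  else if ltr = ',' ∨ ltr = '}' then (st.1 ++ [st.2], [])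
  else (st.1, st.2 ++ [ltr])

def create_genre_arr (string : String) : List String :=
  ((string.toList.foldl aStep ([], [])).1).map String.ofList

-- ===== PORT B =====
def create_genre_arr_alt (string : String) : List String :=
  let cleaned := PySem.Str.replace (PySem.Str.replace (PySem.Str.replace string "{" "") "\"" "") "}" ","
  PySem.List.slice ((PySem.Str.split? cleaned ",").getD []) none (some (-1))

-- ===== PRECONDITION & SPEC =====
def Spec_create_genre_arr (string : String) (out : List String) : Prop := out = create_genre_arr_alt string
instance (string : String) (out : List String) : Decidable (Spec_create_genre_arr string out) := by unfold Spec_create_genre_arr; infer_instance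

-- ===== CLAIM (what is proved, stated in full; the proofs are below) =====
def Claim_equal_create_genre_arr : Prop := ∀ (string : String), Dom_create_genre_arr string → Spec_create_genre_arr string (create_genre_arr string)

-- ===== LEMMAS AND PROOFS =====

-- Specification of single-char replace as a flatMap.
def repl1 (o : Char) (nw : List Char) (cs : List Char) : List Char :=
  cs.flatMap (fun c => if c = o then nw else [c])

theorem repl1_cons (o : Char) (nw : List Char) (c : Char) (t : List Char) :
    repl1 o nw (c :: t) = (if c = o then nw else [c]) ++ repl1 o nw t := by
  simp only [repl1, List.flatMap_cons]

theorem replace_go_single (o : Char) (nw : List Char) :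
    ∀ (cs : List Char) (fuel : Nat) (acc : List Char), cs.length ≤ fuel →
      PySem.Chars.replace.go [o] nw fuel cs acc = acc.reverse ++ repl1 o nw cs := by
  intro cs
  induction cs with
  | nil =>
      intro fuel acc _
      cases fuel <;> simp [PySem.Chars.replace.go, repl1]
  | cons c t ih =>
      intro fuel acc h
      cases fuel with
      | zero => simp at h
      | succ n =>
        by_cases hc : c = o
        · have hpre : List.isPrefixOf [o] (c :: t) = true := by
            simp [List.isPrefixOf, hc]
          simp only [PySem.Chars.replace.go, hpre, if_pos]
          rw [show List.drop (List.length [o]) (c :: t) = t by simp]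
          rw [ih n (nw.reverse ++ acc) (by simpa using h)]
          simp [repl1_cons, hc]
        · have hpre : List.isPrefixOf [o] (c :: t) = false := by
            simp [List.isPrefixOf]
            intro h'; exact absurd h'.symm hc
          simp only [PySem.Chars.replace.go, hpre, Bool.false_eq_true, if_false]
          rw [ih n (c :: acc) (by simpa using h)]
          simp [repl1_cons, hc]

theorem replace_single (o : Char) (nw : List Char) (cs : List Char) :
    PySem.Chars.replace cs [o] nw = repl1 o nw cs := by
  have he : List.isEmpty [o] = false := rfl
  simp only [PySem.Chars.replace, he, Bool.false_eq_true, if_false]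
  simpa using replace_go_single o nw cs cs.length [] (le_refl _)

-- Piece-builder: prepend g to the first piece (total form of "pieces are nonempty").
def consHead (g : List Char) : List (List Char) → List (List Char)
  | [] => [g]
  | x :: xs => (g ++ x) :: xs

-- Specification of splitOn on the single-char separator ','.
def splitC : List Char → List (List Char)
  | [] => [[]]
  | c :: t => if c = ',' then [] :: splitC t else consHead [c] (splitC t)

theorem splitC_ne_nil (cs : List Char) : splitC cs ≠ [] := by
  cases cs with
  | nil => simp [splitC]
  | cons c t =>
      simp only [splitC]
      split_ifs
      · simp
      · cases h : splitC t <;> simp [consHead]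

theorem consHead_consHead (g h : List Char) (xs : List (List Char)) :
    consHead g (consHead h xs) = consHead (g ++ h) xs := by
  cases xs <;> simp [consHead]

theorem consHead_nil_of_ne_nil (xs : List (List Char)) (h : xs ≠ []) :
    consHead [] xs = xs := by
  cases xs with
  | nil => exact absurd rfl h
  | cons x t => simp [consHead]

theorem splitOn_go_comma :
    ∀ (cs : List Char) (fuel : Nat) (cur : List Char) (acc : List (List Char)),
      cs.length ≤ fuel →
      PySem.Chars.splitOn.go [','] fuel cs cur acc =
        acc.reverse ++ consHead cur.reverse (splitC cs) := by
  intro cs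
  induction cs with
  | nil =>
      intro fuel cur acc _
      cases fuel <;> simp [PySem.Chars.splitOn.go, splitC, consHead]
  | cons c t ih =>
      intro fuel cur acc h
      cases fuel with
      | zero => simp at h
      | succ n =>
        by_cases hc : c = ','
        · have hpre : List.isPrefixOf [','] (c :: t) = true := by
            simp [List.isPrefixOf, hc]
          simp only [PySem.Chars.splitOn.go, hpre, if_pos]
          rw [show List.drop (List.length [',']) (c :: t) = t by simp]
          rw [ih n [] (cur.reverse :: acc) (by simpa using h)]
          rw [show consHead ([] : List Char).reverse (splitC t) = splitC t from
                consHead_nil_of_ne_nil _ (splitC_ne_nil t)]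
          simp [splitC, hc, consHead]
        · have hpre : List.isPrefixOf [','] (c :: t) = false := by
            simp [List.isPrefixOf]
            intro h'; exact absurd h'.symm hc
          simp only [PySem.Chars.splitOn.go, hpre, Bool.false_eq_true, if_false]
          rw [ih n (c :: cur) acc (by simpa using h)]
          simp only [splitC, hc, if_false, List.reverse_cons, ← consHead_consHead]

theorem splitOn_comma (cs : List Char) :
    PySem.Chars.splitOn cs [','] = splitC cs := by
  unfold PySem.Chars.splitOn
  rw [splitOn_go_comma cs (cs.length + 1) [] [] (by omega)]
  simp [consHead_nil_of_ne_nil _ (splitC_ne_nil cs)]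

-- The combined effect of B's three replaces, as one char-level transform.
def cleanT (cs : List Char) : List Char :=
  (cs.filter (fun c => ¬ (c = '{' ∨ c = '\"'))).map (fun c => if c = '}' then ',' else c)

theorem cleanT_skip (c : Char) (t : List Char) (h : c = '{' ∨ c = '\"') :
    cleanT (c :: t) = cleanT t := by
  rcases h with h | h <;> simp [cleanT, h]

theorem cleanT_comma (c : Char) (t : List Char) (h1 : ¬ (c = '{' ∨ c = '\"'))
    (h2 : c = ',' ∨ c = '}') : cleanT (c :: t) = ',' :: cleanT t := by
  rcases h2 with h2 | h2 <;> subst h2 <;> simp_all [cleanT]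

theorem cleanT_keep (c : Char) (t : List Char) (h1 : ¬ (c = '{' ∨ c = '\"'))
    (h3 : ¬ c = '}') : cleanT (c :: t) = c :: cleanT t := by
  simp_all [cleanT]

theorem splitC_comma_cons (t : List Char) : splitC (',' :: t) = [] :: splitC t := by
  simp [splitC]

theorem splitC_keep_cons (c : Char) (t : List Char) (h : ¬ c = ',') :
    splitC (c :: t) = consHead [c] (splitC t) := by
  simp [splitC, h]

theorem cleanT_eq_replaces (cs : List Char) :
    PySem.Chars.replace (PySem.Chars.replace (PySem.Chars.replace cs ['{'] []) ['\"'] []) ['}'] [','] = cleanT cs := by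
  rw [replace_single, replace_single, replace_single]
  induction cs with
  | nil => rfl
  | cons c t ih =>
      by_cases h1 : c = '{'
      · rw [repl1_cons, if_pos h1, List.nil_append, ih, cleanT_skip c t (Or.inl h1)]
      · rw [repl1_cons, if_neg h1, List.singleton_append, repl1_cons]
        by_cases h2 : c = '\"'
        · rw [if_pos h2, List.nil_append, ih, cleanT_skip c t (Or.inr h2)]
        · rw [if_neg h2, List.singleton_append, repl1_cons]
          by_cases h3 : c = '}'
          · rw [if_pos h3, ih, cleanT_comma c t (by tauto) (Or.inr h3), List.singleton_append]
          · rw [if_neg h3, ih, cleanT_keep c t (by tauto) h3, List.singleton_append]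

-- A's fold computes gs ++ all-but-last pieces of the comma split of the cleaned tail,
-- with the pending genre g prepended to the first piece.
theorem aFold_spec (cs : List Char) :
    ∀ (gs : List (List Char)) (g : List Char),
      (cs.foldl aStep (gs, g)).1 = gs ++ (consHead g (splitC (cleanT cs))).dropLast := by
  induction cs with
  | nil =>
      intro gs g
      simp [cleanT, splitC, consHead]
  | cons c t ih =>
      intro gs g
      by_cases h1 : c = '{' ∨ c = '\"'
      · rw [List.foldl_cons, show aStep (gs, g) c = (gs, g) by simp [aStep, h1],
            ih gs g, cleanT_skip c t h1]
      · by_cases h2 : c = ',' ∨ c = '}'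
        · rw [List.foldl_cons, show aStep (gs, g) c = (gs ++ [g], []) by simp [aStep, h1, h2],
              ih (gs ++ [g]) [], cleanT_comma c t h1 h2, splitC_comma_cons,
              consHead_nil_of_ne_nil _ (splitC_ne_nil (cleanT t)),
              show consHead g ([] :: splitC (cleanT t)) = g :: splitC (cleanT t) by
                simp [consHead],
              List.dropLast_cons_of_ne_nil (splitC_ne_nil (cleanT t))]
          simp
        · have hc1 : ¬ c = ',' := fun h => h2 (Or.inl h)
          have hc3 : ¬ c = '}' := fun h => h2 (Or.inr h)
          rw [List.foldl_cons, show aStep (gs, g) c = (gs, g ++ [c]) by simp [aStep, h1, h2],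
              ih gs (g ++ [c]), cleanT_keep c t h1 hc3, splitC_keep_cons c _ hc1,
              consHead_consHead]

-- ===== VERDICT (by name: the statement is the Claim_ definition above) =====
theorem create_genre_arr_spec : Claim_equal_create_genre_arr := by
  intro s _
  unfold Spec_create_genre_arr create_genre_arr create_genre_arr_alt
  rw [aFold_spec s.toList [] []]
  rw [consHead_nil_of_ne_nil _ (splitC_ne_nil _)]
  have h1 : PySem.Str.split?
      (PySem.Str.replace (PySem.Str.replace (PySem.Str.replace s "{" "") "\"" "") "}" ",") ","
      = some ((splitC (cleanT s.toList)).map String.ofList) := by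
    unfold PySem.Str.split?
    rw [show ("," : String).toList = [','] from rfl]
    simp only [PySem.Str.toList_replace]
    rw [show ("{" : String).toList = ['{'] from rfl, show ("\"" : String).toList = ['\"'] from rfl,
        show ("}" : String).toList = ['}'] from rfl, show ("," : String).toList = [','] from rfl,
        show ("" : String).toList = ([] : List Char) from rfl]
    rw [cleanT_eq_replaces]
    simp [PySem.Chars.split?, splitOn_comma]
  simp only [h1, Option.getD_some, PySem.List.slice_to_neg_one]
  rw [List.nil_append, List.map_dropLast]
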